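-- pv_equiv track=rewrite | github.com/Acciorocketships/lab | lab/ui/events.py | extract_error_excerpt
-- ===== SOURCE A (Python) =====
-- def extract_error_excerpt(summary: str, error_text: str = "") -> str:
--     """Return a short, user-facing error line from a traceback or crash summary."""
--     for raw in reversed(error_text.splitlines()):
--         line = raw.strip()
--         if not line or line.startswith("During task with name"):
--             continue
--         return line
--     cleaned = summary.strip()
--     if cleaned.lower().startswith("cycle crashed:"):
--         cleaned = cleaned.split(":", 1)[1].strip()
--     return cleaned
-- ===== SOURCE B (Python) =====
-- def extract_error_excerpt(summary: str, error_text: str = "") -> str: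
--     """Return a short, user-facing error line from a traceback or crash summary."""
--     candidates = [line for line in map(str.strip, error_text.splitlines())
--                   if line and not line.startswith("During task with name")]
--     if candidates:
--         return candidates[-1]
--     cleaned = summary.strip()
--     if cleaned.lower().startswith("cycle crashed:"):
--         parts = cleaned.split(":", 1)
--         return (parts[1] if len(parts) > 1 else "").strip()
--     return cleaned
-- ===== Notes on version B (the rewrite author's own statement) =====
-- stated objective: alternative
-- what changed: Replaces A's reversed early-return scan by building the full list of candidate lines (strip, filter) in one comprehension and taking its last element, with the summary fallback expressed via an explicit split-parts lookup.
import Mathlib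
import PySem

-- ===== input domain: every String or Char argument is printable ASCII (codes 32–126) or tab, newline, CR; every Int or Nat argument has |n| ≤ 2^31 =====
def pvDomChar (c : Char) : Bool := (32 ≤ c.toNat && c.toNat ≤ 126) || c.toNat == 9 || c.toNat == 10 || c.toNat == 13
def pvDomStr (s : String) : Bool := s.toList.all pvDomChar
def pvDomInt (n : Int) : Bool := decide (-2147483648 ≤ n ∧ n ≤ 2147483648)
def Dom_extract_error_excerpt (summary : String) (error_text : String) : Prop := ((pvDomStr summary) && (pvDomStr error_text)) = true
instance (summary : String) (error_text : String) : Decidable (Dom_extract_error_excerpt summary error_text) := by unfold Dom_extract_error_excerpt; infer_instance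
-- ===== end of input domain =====

-- ===== PORT A =====
-- B replaces A's reversed early-return scan by a strip+filter comprehension whose last
-- element is taken, and an explicit split-parts fallback (objective: alternative; same cost).

-- 'line.split(":", 1)[1].strip()' — the guard guarantees ':' is present, so the branch is
-- exact there; the .getD defaults cover the unreachable IndexError/empty-sep cases.
def pvTailAfterColonA (cleaned : String) : String :=
  match PySem.Str.splitMax? cleaned ":" 1 with
  | some parts => PySem.Str.strip ((PySem.List.pyGet? parts 1).getD "")
  | none => ""

-- the fallback on the summary, reached when the loop returns nothing
def pvFallbackA (summary : String) : String :=
  let cleaned := PySem.Str.strip summary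
  if PySem.Str.startswith (PySem.Str.lower cleaned) "cycle crashed:" then
    pvTailAfterColonA cleaned
  else cleaned

-- the 'for raw in reversed(...)' loop with its early return, on the already-reversed list
def pvScanRevA : List String → Option String
  | [] => none
  | raw :: rest =>
    let line := PySem.Str.strip raw
    if line = "" || PySem.Str.startswith line "During task with name" then pvScanRevA rest
    else some line

def extract_error_excerpt (summary : String) (error_text : String) : String :=
  match pvScanRevA (PySem.Str.splitlines error_text).reverse with
  | some line => line
  | none => pvFallbackA summary

-- ===== PORT B =====
-- the comprehension's filter: keep non-empty lines not starting with the task banner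
def pvKeepB (line : String) : Bool :=
  line ≠ "" && !PySem.Str.startswith line "During task with name"

-- '(parts[1] if len(parts) > 1 else "").strip()'
def pvSecondPartB (parts : List String) : String :=
  PySem.Str.strip (if parts.length > 1 then parts.getD 1 "" else "")

def extract_error_excerpt_alt (summary : String) (error_text : String) : String :=
  let candidates := ((PySem.Str.splitlines error_text).map PySem.Str.strip).filter pvKeepB
  match candidates.getLast? with
  | some line => line
  | none =>
    let cleaned := PySem.Str.strip summary
    if PySem.Str.startswith (PySem.Str.lower cleaned) "cycle crashed:" then
      pvSecondPartB ((PySem.Str.splitMax? cleaned ":" 1).getD [])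
    else cleaned

-- ===== PRECONDITION & SPEC =====
def Spec_extract_error_excerpt (summary : String) (error_text : String) (out : String) : Prop := out = extract_error_excerpt_alt summary error_text
instance (summary : String) (error_text : String) (out : String) : Decidable (Spec_extract_error_excerpt summary error_text out) := by unfold Spec_extract_error_excerpt; infer_instance

-- ===== CLAIM (what is proved, stated in full; the proofs are below) =====
def Claim_equal_extract_error_excerpt : Prop := ∀ (summary : String) (error_text : String), Dom_extract_error_excerpt summary error_text → Spec_extract_error_excerpt summary error_text (extract_error_excerpt summary error_text)

-- ===== LEMMAS AND PROOFS =====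

-- A's backward early-return scan of ys is the head of B's filtered, stripped list of ys
theorem pvScanRevA_eq_head (ys : List String) :
    pvScanRevA ys = ((ys.map PySem.Str.strip).filter pvKeepB).head? := by
  induction ys with
  | nil => rfl
  | cons y ys ih =>
    simp only [pvScanRevA, List.map_cons, List.filter_cons, pvKeepB]
    by_cases h0 : PySem.Str.strip y = ""
    · simp only [h0, decide_true, Bool.true_or, if_true, ne_eq, not_true_eq_false,
        decide_false, Bool.false_and, Bool.false_eq_true, if_false, ih]
    · by_cases hc : PySem.Str.startswith (PySem.Str.strip y) "During task with name" = true
      · simp only [h0, decide_false, Bool.false_or, hc, if_true, ne_eq,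
          Bool.not_true, Bool.and_false, Bool.false_eq_true, if_false, ih]
      · rw [Bool.not_eq_true] at hc
        simp only [h0, decide_false, Bool.false_or, hc, Bool.false_eq_true, if_false, ne_eq,
          not_false_eq_true, decide_true, Bool.not_false, Bool.true_and, if_true,
          List.head?_cons]

-- the two formulations of 'split(":", 1)[1]' agree
theorem pvTail_eq (cleaned : String) :
    pvTailAfterColonA cleaned =
      pvSecondPartB ((PySem.Str.splitMax? cleaned ":" 1).getD []) := by
  unfold pvTailAfterColonA pvSecondPartB
  cases hs : PySem.Str.splitMax? cleaned ":" 1 with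
  | none => simp; decide
  | some parts =>
    simp only [Option.getD_some]
    match parts with
    | [] => simp [PySem.List.pyGet?]
    | [a] => simp [PySem.List.pyGet?, PySem.List.pyIdx?]
    | a :: b :: t => simp [PySem.List.pyGet?, PySem.List.pyIdx?]

-- ===== VERDICT (by name: the statement is the Claim_ definition above) =====
theorem extract_error_excerpt_spec : Claim_equal_extract_error_excerpt := by
  intro summary error_text _
  show extract_error_excerpt summary error_text = extract_error_excerpt_alt summary error_text
  unfold extract_error_excerpt extract_error_excerpt_alt pvFallbackA
  simp only [pvScanRevA_eq_head, List.map_reverse, List.filter_reverse, List.head?_reverse,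
    pvTail_eq]
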